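-- pv_equiv track=rewrite | github.com/murathankarasu/Recommend-Service | src/services/reccomend_service/algorithms/emotion_transition.py | analyze_emotion_transition
-- ===== SOURCE A (Python) =====
-- from typing import List, Dict
--
-- def analyze_emotion_transition(interactions: List[Dict]) -> str:
--     """
--     Kullanıcının son etkileşimlerinde duygu geçişini analiz eder.
--     En son iki farklı duyguyu bulur ve geçişi döndürür (örn: 'Neşe (Joy)' -> 'Üzüntü (Sadness)').
--     Eğer geçiş yoksa None döner.
--     """
--     if not interactions or len(interactions) < 2:
--         return None
--     # Son etkileşimlerden duyguları sırayla al
--     emotions = [i.get('emotion') for i in interactions if i.get('emotion')]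
--     if len(emotions) < 2:
--         return None
--     # Sondan başa farklı iki duyguyu bul
--     last = emotions[-1]
--     for prev in reversed(emotions[:-1]):
--         if prev != last:
--             return f"{prev} -> {last}"
--     return None
-- ===== SOURCE B (Python) =====
-- def analyze_emotion_transition(interactions):
--     if not interactions or len(interactions) < 2:
--         return None
--     emotions = [i.get('emotion') for i in interactions if i.get('emotion')]
--     if len(emotions) < 2:
--         return None
--     # Single forward pass: remember the last consecutive pair that differs.
--     result = None
--     for prev, cur in zip(emotions, emotions[1:]):
--         if prev != cur:
--             result = f"{prev} -> {cur}"
--     return result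
-- ===== Notes on version B (the rewrite author's own statement) =====
-- stated objective: alternative
-- what changed: Replaces the backwards scan from the last element (find the most recent emotion differing from the final one) by a single forward pass over consecutive pairs that keeps overwriting an accumulator with the last differing adjacent pair.
import Mathlib
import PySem

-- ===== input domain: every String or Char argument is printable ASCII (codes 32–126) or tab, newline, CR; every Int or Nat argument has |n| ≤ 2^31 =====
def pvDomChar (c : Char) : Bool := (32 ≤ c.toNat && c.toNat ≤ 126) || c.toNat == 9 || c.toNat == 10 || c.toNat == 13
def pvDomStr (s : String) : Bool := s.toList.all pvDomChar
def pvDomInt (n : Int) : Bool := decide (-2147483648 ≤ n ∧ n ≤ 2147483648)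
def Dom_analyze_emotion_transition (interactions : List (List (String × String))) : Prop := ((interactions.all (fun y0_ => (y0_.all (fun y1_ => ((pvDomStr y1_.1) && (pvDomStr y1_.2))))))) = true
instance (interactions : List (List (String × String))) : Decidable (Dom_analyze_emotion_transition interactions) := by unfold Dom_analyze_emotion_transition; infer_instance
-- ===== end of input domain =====

-- B replaces A's backwards scan for the most recent emotion differing from the
-- final one by a single forward pass keeping the last differing adjacent pair
-- (alternative decomposition, same O(n) cost).

-- ===== PORT A =====
-- emotions = [i.get('emotion') for i in interactions if i.get('emotion')]
-- (shared: both Python versions contain this identical comprehension)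
def pvEmotions (interactions : List (List (String × String))) : List String :=
  interactions.filterMap (fun i =>
    match PySem.Dict.get? (PySem.Dict.mk i) "emotion" with
    | some s => if s = "" then none else some s
    | none => none)

def analyze_emotion_transition (interactions : List (List (String × String))) : Option String :=
  if interactions.length < 2 then none
  else
    let emotions := pvEmotions interactions
    if emotions.length < 2 then none
    else
      match PySem.List.pyGet? emotions (-1) with          -- last = emotions[-1]
      | none => none
      | some last =>
        -- for prev in reversed(emotions[:-1]): if prev != last: return ...
        match (PySem.List.slice emotions none (some (-1))).reverse.find?
                (fun prev => prev != last) with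
        | some prev => some (prev ++ " -> " ++ last)
        | none => none

-- ===== PORT B =====
def analyze_emotion_transition_alt (interactions : List (List (String × String))) : Option String :=
  if interactions.length < 2 then none
  else
    let emotions := pvEmotions interactions
    if emotions.length < 2 then none
    else
      -- result = None; for prev, cur in zip(emotions, emotions[1:]): ...
      (emotions.zip (emotions.drop 1)).foldl
        (fun result pc => if pc.1 != pc.2 then some (pc.1 ++ " -> " ++ pc.2) else result)
        none

-- ===== PRECONDITION & SPEC =====
def Spec_analyze_emotion_transition (interactions : List (List (String × String))) (out : Option String) : Prop := out = analyze_emotion_transition_alt interactions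
instance (interactions : List (List (String × String))) (out : Option String) : Decidable (Spec_analyze_emotion_transition interactions out) := by unfold Spec_analyze_emotion_transition; infer_instance

-- ===== CLAIM (what is proved, stated in full; the proofs are below) =====
def Claim_equal_analyze_emotion_transition : Prop := ∀ (interactions : List (List (String × String))), Dom_analyze_emotion_transition interactions → Spec_analyze_emotion_transition interactions (analyze_emotion_transition interactions)

-- ===== LEMMAS AND PROOFS =====

-- consecutive pairs of l ++ [w, z] are those of l ++ [w] plus the final (w, z)
theorem pvPairs_app (l : List String) (w z : String) :
    ((l ++ [w, z]).zip ((l ++ [w, z]).drop 1))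
      = ((l ++ [w]).zip ((l ++ [w]).drop 1)) ++ [(w, z)] := by
  induction l with
  | nil => simp
  | cons a l ih =>
    cases l with
    | nil => simp
    | cons b l' =>
      simpa using ih

-- B's forward fold over ys ++ [z] computes A's backwards search over ys
theorem pvKey (ys : List String) (z : String) :
    ((ys ++ [z]).zip ((ys ++ [z]).drop 1)).foldl
        (fun result pc => if pc.1 != pc.2 then some (pc.1 ++ " -> " ++ pc.2) else result)
        none
      = (ys.reverse.find? (fun p => p != z)).map (fun p => p ++ " -> " ++ z) := by
  induction ys using List.reverseRecOn generalizing z with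
  | nil => simp
  | append_singleton ws w ih =>
    rw [List.append_assoc]
    show ((ws ++ [w, z]).zip ((ws ++ [w, z]).drop 1)).foldl _ none = _
    rw [pvPairs_app, List.foldl_append]
    rw [List.foldl_cons, List.foldl_nil]
    by_cases hwz : w = z
    · subst hwz
      rw [if_neg (by simp), ih]
      simp
    · rw [if_pos (by simp [hwz])]
      simp [hwz]

-- ===== VERDICT =====
theorem analyze_emotion_transition_spec : Claim_equal_analyze_emotion_transition := by
  intro interactions _
  unfold Spec_analyze_emotion_transition analyze_emotion_transition analyze_emotion_transition_alt
  by_cases h1 : interactions.length < 2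
  · simp [h1]
  · simp only [h1, if_false]
    set es := pvEmotions interactions with hes
    by_cases h2 : es.length < 2
    · simp [h2]
    · simp only [h2, if_false]
      have hne : es ≠ [] := by
        intro h; rw [h] at h2; simp at h2
      obtain ⟨ys, z, hsplit⟩ : ∃ ys z, es = ys ++ [z] :=
        ⟨es.dropLast, es.getLast hne, (List.dropLast_append_getLast hne).symm⟩
      rw [hsplit]
      rw [PySem.List.pyGet?_neg_one, PySem.List.slice_to_neg_one]
      simp only [List.getLast?_concat, List.dropLast_concat]
      rw [pvKey]
      cases ys.reverse.find? (fun p => p != z) <;> simp
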